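-- pv_equiv track=rewrite | github.com/BucketSran/behavioral-veriloga-eval | runners/patch_region_locator.py | _score_region
-- ===== SOURCE A (Python) =====
-- def _score_region(pattern: str, kind: str, text: str, filename: str) -> tuple[int, str]:
--     lowered = text.lower()
--     score = 0
--     reasons: list[str] = []
--
--     if kind == "event_block":
--         score += 20
--         reasons.append("event block")
--     elif kind == "timer_block":
--         score += 18
--         reasons.append("timer block")
--     elif kind == "analog_block":
--         score += 5
--         reasons.append("analog fallback")
--         # Use the whole analog block only when no tighter event/timer block is
--         # plausible. This keeps the repair mechanically local.
--         score -= 20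
--     elif kind == "output_assignment":
--         score += 16
--         reasons.append("output assignment")
--
--     if pattern == "wrong_event_cadence_or_edge_count":
--         for token in ("counter", "count", "toggle", "div", "ratio", "period", "lock"):
--             if token in lowered or token in filename.lower():
--                 score += 8
--                 reasons.append(token)
--     elif pattern == "missing_or_wrong_pulse_window":
--         for token in ("up", "dn", "pulse", "release", "ref", "div", "edge"):
--             if token in lowered or token in filename.lower():
--                 score += 8
--                 reasons.append(token)
--         if kind == "output_assignment":
--             score += 5
--             reasons.append("pulse output")
--     elif pattern == "stuck_or_wrong_digital_sequence":
--         for token in ("state", "lfsr", "shift", "clk", "rst", "transition", "dpn", "out"):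
--             if token in lowered or token in filename.lower():
--                 score += 8
--                 reasons.append(token)
--         if kind == "output_assignment":
--             score += 12
--             reasons.append("sequence output")
--     elif pattern == "low_code_coverage_or_stuck_code_path":
--         for token in ("code", "sample", "threshold", "quant", "dac", "dout", "vout", "vin"):
--             if token in lowered or token in filename.lower():
--                 score += 8
--                 reasons.append(token)
--     elif pattern == "wrong_analog_range_or_threshold_window":
--         for token in ("threshold", "window", "scale", "transition", "vout", "span"):
--             if token in lowered or token in filename.lower():
--                 score += 8
--                 reasons.append(token)
--     else:
--         for token in ("reset", "rst", "cross", "state", "output", "transition"):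
--             if token in lowered:
--                 score += 5
--                 reasons.append(token)
--
--     # Prefer reasonably small regions over whole analog blocks when tied.
--     line_count = text.count("\n") + 1
--     if line_count <= 80:
--         score += 6
--     if line_count > 180:
--         score -= 20
--         reasons.append("large")
--
--     return score, ", ".join(reasons[:8])
-- ===== SOURCE B (Python) =====
-- # Rule-engine re-implementation: one flat declarative rule list, evaluated in a
-- # single uniform pass; score = sum of fired deltas, reasons = fired labels.
--
-- def _mk_rules():
--     kind_specs = (
--         ("event_block", 20, "event block"),
--         ("timer_block", 18, "timer block"),
--         ("analog_block", -15, "analog fallback"),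
--         ("output_assignment", 16, "output assignment"),
--     )
--     pattern_specs = (
--         ("wrong_event_cadence_or_edge_count",
--          ("counter", "count", "toggle", "div", "ratio", "period", "lock"), None),
--         ("missing_or_wrong_pulse_window",
--          ("up", "dn", "pulse", "release", "ref", "div", "edge"), (5, "pulse output")),
--         ("stuck_or_wrong_digital_sequence",
--          ("state", "lfsr", "shift", "clk", "rst", "transition", "dpn", "out"), (12, "sequence output")),
--         ("low_code_coverage_or_stuck_code_path",
--          ("code", "sample", "threshold", "quant", "dac", "dout", "vout", "vin"), None),
--         ("wrong_analog_range_or_threshold_window",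
--          ("threshold", "window", "scale", "transition", "vout", "span"), None),
--     )
--     known = tuple(p for p, _, _ in pattern_specs)
--     rules = []
--     for k, delta, label in kind_specs:
--         rules.append(((lambda c, k=k: c[1] == k), delta, label))
--     for pat, tokens, bonus in pattern_specs:
--         for t in tokens:
--             rules.append(((lambda c, pat=pat, t=t: c[0] == pat and (t in c[2] or t in c[3])), 8, t))
--         if bonus is not None:
--             rules.append(((lambda c, pat=pat: c[0] == pat and c[1] == "output_assignment"),
--                           bonus[0], bonus[1]))
--     for t in ("reset", "rst", "cross", "state", "output", "transition"):
--         rules.append(((lambda c, t=t: c[0] not in known and t in c[2]), 5, t))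
--     rules.append((lambda c: c[4] <= 80, 6, None))
--     rules.append((lambda c: c[4] > 180, -20, "large"))
--     return rules
--
--
-- _RULES = _mk_rules()
--
--
-- def _score_region(pattern: str, kind: str, text: str, filename: str) -> tuple[int, str]:
--     ctx = (pattern, kind, text.lower(), filename.lower(), text.count("\n") + 1)
--     fired = [(delta, label) for cond, delta, label in _RULES if cond(ctx)]
--     score = sum(delta for delta, _ in fired)
--     reasons = [label for _, label in fired if label is not None]
--     return score, ", ".join(reasons[:8])
-- ===== Notes on version B (the rewrite author's own statement) =====
-- stated objective: alternative
-- what changed: Replaces A's interleaved if/elif branching with mutation by a flat declarative rule engine: a module-level list of (condition, delta, label) rules built once, evaluated in one uniform pass; the score is the sum of fired deltas and the reasons are the fired labels, with analog_block's +5/-20 netted to a single -15 rule.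
import Mathlib
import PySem

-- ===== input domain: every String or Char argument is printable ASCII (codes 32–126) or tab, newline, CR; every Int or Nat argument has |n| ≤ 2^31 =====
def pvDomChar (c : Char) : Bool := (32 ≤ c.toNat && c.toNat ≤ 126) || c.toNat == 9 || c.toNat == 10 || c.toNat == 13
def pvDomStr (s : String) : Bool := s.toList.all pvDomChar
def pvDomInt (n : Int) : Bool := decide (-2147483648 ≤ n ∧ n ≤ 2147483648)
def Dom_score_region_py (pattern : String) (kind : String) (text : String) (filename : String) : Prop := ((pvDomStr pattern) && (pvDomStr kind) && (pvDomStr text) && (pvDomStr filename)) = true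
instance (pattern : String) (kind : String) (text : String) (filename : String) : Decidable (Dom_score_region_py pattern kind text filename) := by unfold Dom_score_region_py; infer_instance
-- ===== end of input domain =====

-- B replaces A's nested if/elif chains with a flat declarative rule list evaluated in one
-- uniform pass (fired events -> sum of deltas, labels joined); objective: alternative, same cost.


-- ===== PORT A =====
-- A's kind if/elif chain (analog_block: += 5 then -= 20, kept as two steps)
def pvAKind (kind : String) (st : Int × List String) : Int × List String :=
  if kind == "event_block" then (st.1 + 20, st.2 ++ ["event block"])
  else if kind == "timer_block" then (st.1 + 18, st.2 ++ ["timer block"])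
  else if kind == "analog_block" then
    let score := st.1 + 5
    let reasons := st.2 ++ ["analog fallback"]
    (score - 20, reasons)
  else if kind == "output_assignment" then (st.1 + 16, st.2 ++ ["output assignment"])
  else st

-- A's 'for token in (…): if <hit>: score += pts; reasons.append(token)' loop
def pvScanA (tokens : List String) (pts : Int) (hit : String → Bool)
    (st : Int × List String) : Int × List String :=
  tokens.foldl (fun st t => if hit t then (st.1 + pts, st.2 ++ [t]) else st) st

-- A's pattern if/elif chain; 'hit' is 'token in lowered or token in filename.lower()',
-- 'low' is the default branch's 'token in lowered'
def pvAPattern (pattern : String) (kind : String) (hit low : String → Bool)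
    (st : Int × List String) : Int × List String :=
  if pattern == "wrong_event_cadence_or_edge_count" then
    pvScanA ["counter", "count", "toggle", "div", "ratio", "period", "lock"] 8 hit st
  else if pattern == "missing_or_wrong_pulse_window" then
    let st := pvScanA ["up", "dn", "pulse", "release", "ref", "div", "edge"] 8 hit st
    if kind == "output_assignment" then (st.1 + 5, st.2 ++ ["pulse output"]) else st
  else if pattern == "stuck_or_wrong_digital_sequence" then
    let st := pvScanA ["state", "lfsr", "shift", "clk", "rst", "transition", "dpn", "out"] 8 hit st
    if kind == "output_assignment" then (st.1 + 12, st.2 ++ ["sequence output"]) else st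
  else if pattern == "low_code_coverage_or_stuck_code_path" then
    pvScanA ["code", "sample", "threshold", "quant", "dac", "dout", "vout", "vin"] 8 hit st
  else if pattern == "wrong_analog_range_or_threshold_window" then
    pvScanA ["threshold", "window", "scale", "transition", "vout", "span"] 8 hit st
  else
    pvScanA ["reset", "rst", "cross", "state", "output", "transition"] 5 low st

def score_region_py (pattern : String) (kind : String) (text : String) (filename : String) : Int × String :=
  let lowered := PySem.Str.lower text
  let st := pvAKind kind (0, [])
  let st := pvAPattern pattern kind
      (fun t => PySem.Str.isIn t lowered || PySem.Str.isIn t (PySem.Str.lower filename))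
      (fun t => PySem.Str.isIn t lowered) st
  let lineCount : Int := (PySem.Str.count text "\n" : Int) + 1
  let st := if lineCount ≤ 80 then (st.1 + 6, st.2) else st
  let st := if lineCount > 180 then (st.1 - 20, st.2 ++ ["large"]) else st
  (st.1, PySem.Str.join ", " (st.2.take 8))

-- ===== PORT B =====
-- B's context tuple (pattern, kind, lowered, filename.lower(), line_count)
abbrev pvCtx : Type := String × String × String × String × Int
-- a rule: (condition on the context, delta, optional reason label)
abbrev pvRule : Type := (pvCtx → Bool) × Int × Option String

def pvKindSpecs : List (String × Int × String) :=
  [("event_block", 20, "event block"), ("timer_block", 18, "timer block"),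
   ("analog_block", -15, "analog fallback"), ("output_assignment", 16, "output assignment")]

def pvPatternSpecs : List (String × List String × Option (Int × String)) :=
  [("wrong_event_cadence_or_edge_count",
      (["counter", "count", "toggle", "div", "ratio", "period", "lock"], none)),
   ("missing_or_wrong_pulse_window",
      (["up", "dn", "pulse", "release", "ref", "div", "edge"], some (5, "pulse output"))),
   ("stuck_or_wrong_digital_sequence",
      (["state", "lfsr", "shift", "clk", "rst", "transition", "dpn", "out"], some (12, "sequence output"))),
   ("low_code_coverage_or_stuck_code_path",
      (["code", "sample", "threshold", "quant", "dac", "dout", "vout", "vin"], none)),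
   ("wrong_analog_range_or_threshold_window",
      (["threshold", "window", "scale", "transition", "vout", "span"], none))]

def pvKnown : List String := pvPatternSpecs.map (·.1)

def pvTokRule (pat : String) (t : String) : pvRule :=
  ((fun c => c.1 == pat && (PySem.Str.isIn t c.2.2.1 || PySem.Str.isIn t c.2.2.2.1)), 8, some t)

def pvSegRules (spec : String × List String × Option (Int × String)) : List pvRule :=
  spec.2.1.map (pvTokRule spec.1) ++
  (match spec.2.2 with
   | some b => [((fun c => c.1 == spec.1 && c.2.1 == "output_assignment"), b.1, some b.2)]
   | none => [])

def pvDefRule (t : String) : pvRule :=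
  ((fun c => !(pvKnown.contains c.1) && PySem.Str.isIn t c.2.2.1), 5, some t)

def pvRules : List pvRule :=
  pvKindSpecs.map (fun s => ((fun c => c.2.1 == s.1), s.2.1, some s.2.2)) ++
  pvPatternSpecs.flatMap pvSegRules ++
  (["reset", "rst", "cross", "state", "output", "transition"].map pvDefRule) ++
  [((fun c => decide (c.2.2.2.2 ≤ 80)), 6, none),
   ((fun c => decide (c.2.2.2.2 > 180)), -20, some "large")]

def pvFire (ctx : pvCtx) (rules : List pvRule) : List (Int × Option String) :=
  rules.filterMap (fun r => if r.1 ctx then some (r.2.1, r.2.2) else none)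

def score_region_py_alt (pattern : String) (kind : String) (text : String) (filename : String) : Int × String :=
  let ctx : pvCtx := (pattern, kind, PySem.Str.lower text, PySem.Str.lower filename,
                      (PySem.Str.count text "\n" : Int) + 1)
  let fired := pvFire ctx pvRules
  let score := (fired.map (·.1)).sum
  let reasons := fired.filterMap (·.2)
  (score, PySem.Str.join ", " (reasons.take 8))

-- ===== PRECONDITION & SPEC =====
def Spec_score_region_py (pattern : String) (kind : String) (text : String) (filename : String) (out : Int × String) : Prop := out = score_region_py_alt pattern kind text filename
instance (pattern : String) (kind : String) (text : String) (filename : String) (out : Int × String) : Decidable (Spec_score_region_py pattern kind text filename out) := by unfold Spec_score_region_py; infer_instance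

-- ===== CLAIM (what is proved, stated in full; the proofs are below) =====
def Claim_equal_score_region_py : Prop := ∀ (pattern : String) (kind : String) (text : String) (filename : String), Dom_score_region_py pattern kind text filename → Spec_score_region_py pattern kind text filename (score_region_py pattern kind text filename)

-- ===== LEMMAS AND PROOFS =====
-- proof-only restatements of the two computations over (pattern, kind, lowered, fnameLower, lineCount)
def pvACore (p k L F : String) (n : Int) : Int × List String :=
  let st := pvAKind k (0, [])
  let st := pvAPattern p k (fun t => PySem.Str.isIn t L || PySem.Str.isIn t F)
      (fun t => PySem.Str.isIn t L) st
  let st := if n ≤ 80 then (st.1 + 6, st.2) else st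
  if n > 180 then (st.1 - 20, st.2 ++ ["large"]) else st

def pvBCore (ctx : pvCtx) : Int × List String :=
  ((( pvFire ctx pvRules).map (Prod.fst (β := Option String))).sum,
   (pvFire ctx pvRules).filterMap (Prod.snd (β := Option String)))

-- A's accumulating token loop equals filter-then-collect
theorem pvScanA_eq (tokens : List String) (pts : Int) (hit : String → Bool)
    (st : Int × List String) :
    pvScanA tokens pts hit st
      = (st.1 + pts * ((tokens.filter hit).length : Int), st.2 ++ tokens.filter hit) := by
  induction tokens generalizing st with
  | nil => simp [pvScanA]
  | cons t ts ih =>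
    unfold pvScanA
    rw [List.foldl_cons]
    by_cases h : hit t
    · rw [if_pos h]
      have hih := ih (st.1 + pts, st.2 ++ [t])
      unfold pvScanA at hih
      rw [hih, List.filter_cons_of_pos h, Prod.mk.injEq]
      exact ⟨by simp only [List.length_cons]; push_cast; ring, by simp⟩
    · rw [if_neg h]
      have hih := ih st
      unfold pvScanA at hih
      rw [hih, List.filter_cons_of_neg h]

-- firing a token-rule segment whose pattern matches = filter the tokens
theorem pvFire_tok_eq (ctx : pvCtx) (pat : String) (tokens : List String)
    (h : (ctx.1 == pat) = true) :
    pvFire ctx (tokens.map (pvTokRule pat))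
      = (tokens.filter (fun t => PySem.Str.isIn t ctx.2.2.1 || PySem.Str.isIn t ctx.2.2.2.1)).map
          (fun t => ((8 : Int), some t)) := by
  induction tokens with
  | nil => rfl
  | cons t ts ih =>
    simp only [pvFire] at ih ⊢
    simp only [List.map_cons, List.filterMap_cons, pvTokRule, h, Bool.true_and, List.filter_cons]
    cases hh : (PySem.Str.isIn t ctx.2.2.1 || PySem.Str.isIn t ctx.2.2.2.1) with
    | true => simp [ih]
    | false => simp [ih]

-- firing a token-rule segment whose pattern does not match = nothing
theorem pvFire_tok_ne (ctx : pvCtx) (pat : String) (tokens : List String)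
    (h : (ctx.1 == pat) = false) :
    pvFire ctx (tokens.map (pvTokRule pat)) = [] := by
  induction tokens with
  | nil => rfl
  | cons t ts ih =>
    simp only [pvFire] at ih ⊢
    simp only [List.map_cons, List.filterMap_cons, pvTokRule, h, Bool.false_and,
      Bool.false_eq_true, if_false]
    exact ih

-- firing the default segment = filter by 'token in lowered' (when the pattern is unknown)
theorem pvFire_def_eq (ctx : pvCtx) (tokens : List String)
    (h : pvKnown.contains ctx.1 = false) :
    pvFire ctx (tokens.map pvDefRule)
      = (tokens.filter (fun t => PySem.Str.isIn t ctx.2.2.1)).map (fun t => ((5 : Int), some t)) := by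
  induction tokens with
  | nil => rfl
  | cons t ts ih =>
    simp only [pvFire] at ih ⊢
    simp only [List.map_cons, List.filterMap_cons, pvDefRule, h, Bool.not_false, Bool.true_and,
      List.filter_cons]
    cases hh : PySem.Str.isIn t ctx.2.2.1 with
    | true => simp [ih]
    | false => simp [ih]

theorem pvFire_def_ne (ctx : pvCtx) (tokens : List String)
    (h : pvKnown.contains ctx.1 = true) :
    pvFire ctx (tokens.map pvDefRule) = [] := by
  induction tokens with
  | nil => rfl
  | cons t ts ih =>
    simp only [pvFire] at ih ⊢
    simp only [List.map_cons, List.filterMap_cons, pvDefRule, h, Bool.not_true, Bool.false_and,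
      Bool.false_eq_true, if_false]
    exact ih

-- pvFire distributes over append
theorem pvFire_append (ctx : pvCtx) (a b : List pvRule) :
    pvFire ctx (a ++ b) = pvFire ctx a ++ pvFire ctx b := by
  simp [pvFire]

-- A's kind chain, started from (0, []), produces exactly the kind-rules' fired events
theorem pvKindFire (p k L F : String) (n : Int) :
    pvAKind k (0, [])
      = (((pvFire (p, k, L, F, n) (pvKindSpecs.map (fun s => ((fun c => c.2.1 == s.1), s.2.1, some s.2.2)))).map
            (Prod.fst (β := Option String))).sum,
         (pvFire (p, k, L, F, n) (pvKindSpecs.map (fun s => ((fun c => c.2.1 == s.1), s.2.1, some s.2.2)))).filterMap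
            (Prod.snd (β := Option String))) := by
  by_cases h1 : k = "event_block"
  · subst h1; rfl
  by_cases h2 : k = "timer_block"
  · subst h2; rfl
  by_cases h3 : k = "analog_block"
  · subst h3; rfl
  by_cases h4 : k = "output_assignment"
  · subst h4; rfl
  · simp [pvAKind, pvFire, pvKindSpecs, beq_iff_eq, h1, h2, h3, h4]

-- the two cores agree
theorem pvCore_eq (p k L F : String) (n : Int) : pvACore p k L F n = pvBCore (p, k, L, F, n) := by
  unfold pvACore pvBCore
  rw [pvKindFire p k L F n]
  by_cases h1 : p = "wrong_event_cadence_or_edge_count"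
  · subst h1
    simp only [pvRules, pvPatternSpecs, List.flatMap_cons, List.flatMap_nil, List.append_nil,
      pvSegRules, pvAPattern, pvScanA_eq, pvFire_append, List.append_assoc]
    rw [pvFire_tok_eq _ "wrong_event_cadence_or_edge_count" _ rfl,
      pvFire_tok_ne _ "missing_or_wrong_pulse_window" _ rfl,
      pvFire_tok_ne _ "stuck_or_wrong_digital_sequence" _ rfl,
      pvFire_tok_ne _ "low_code_coverage_or_stuck_code_path" _ rfl,
      pvFire_tok_ne _ "wrong_analog_range_or_threshold_window" _ rfl,
      pvFire_def_ne _ _ rfl]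
    simp [pvFire, List.sum_append, List.filterMap_append]
    split_ifs <;>
      simp [List.filterMap, List.append_assoc, *, Prod.ext_iff, Function.comp_def] <;> ring
  by_cases h2 : p = "missing_or_wrong_pulse_window"
  · subst h2
    simp only [pvRules, pvPatternSpecs, List.flatMap_cons, List.flatMap_nil, List.append_nil,
      pvSegRules, pvAPattern, pvScanA_eq, pvFire_append, List.append_assoc]
    rw [pvFire_tok_eq _ "missing_or_wrong_pulse_window" _ rfl,
      pvFire_tok_ne _ "wrong_event_cadence_or_edge_count" _ rfl,
      pvFire_tok_ne _ "stuck_or_wrong_digital_sequence" _ rfl,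
      pvFire_tok_ne _ "low_code_coverage_or_stuck_code_path" _ rfl,
      pvFire_tok_ne _ "wrong_analog_range_or_threshold_window" _ rfl,
      pvFire_def_ne _ _ rfl]
    simp [pvFire, List.sum_append, List.filterMap_append]
    split_ifs <;>
      simp [List.filterMap, List.append_assoc, *, Prod.ext_iff, Function.comp_def] <;> ring
  by_cases h3 : p = "stuck_or_wrong_digital_sequence"
  · subst h3
    simp only [pvRules, pvPatternSpecs, List.flatMap_cons, List.flatMap_nil, List.append_nil,
      pvSegRules, pvAPattern, pvScanA_eq, pvFire_append, List.append_assoc]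
    rw [pvFire_tok_eq _ "stuck_or_wrong_digital_sequence" _ rfl,
      pvFire_tok_ne _ "wrong_event_cadence_or_edge_count" _ rfl,
      pvFire_tok_ne _ "missing_or_wrong_pulse_window" _ rfl,
      pvFire_tok_ne _ "low_code_coverage_or_stuck_code_path" _ rfl,
      pvFire_tok_ne _ "wrong_analog_range_or_threshold_window" _ rfl,
      pvFire_def_ne _ _ rfl]
    simp [pvFire, List.sum_append, List.filterMap_append]
    split_ifs <;>
      simp [List.filterMap, List.append_assoc, *, Prod.ext_iff, Function.comp_def] <;> ring
  by_cases h4 : p = "low_code_coverage_or_stuck_code_path"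
  · subst h4
    simp only [pvRules, pvPatternSpecs, List.flatMap_cons, List.flatMap_nil, List.append_nil,
      pvSegRules, pvAPattern, pvScanA_eq, pvFire_append, List.append_assoc]
    rw [pvFire_tok_eq _ "low_code_coverage_or_stuck_code_path" _ rfl,
      pvFire_tok_ne _ "wrong_event_cadence_or_edge_count" _ rfl,
      pvFire_tok_ne _ "missing_or_wrong_pulse_window" _ rfl,
      pvFire_tok_ne _ "stuck_or_wrong_digital_sequence" _ rfl,
      pvFire_tok_ne _ "wrong_analog_range_or_threshold_window" _ rfl,
      pvFire_def_ne _ _ rfl]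
    simp [pvFire, List.sum_append, List.filterMap_append]
    split_ifs <;>
      simp [List.filterMap, List.append_assoc, *, Prod.ext_iff, Function.comp_def] <;> ring
  by_cases h5 : p = "wrong_analog_range_or_threshold_window"
  · subst h5
    simp only [pvRules, pvPatternSpecs, List.flatMap_cons, List.flatMap_nil, List.append_nil,
      pvSegRules, pvAPattern, pvScanA_eq, pvFire_append, List.append_assoc]
    rw [pvFire_tok_eq _ "wrong_analog_range_or_threshold_window" _ rfl,
      pvFire_tok_ne _ "wrong_event_cadence_or_edge_count" _ rfl,
      pvFire_tok_ne _ "missing_or_wrong_pulse_window" _ rfl,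
      pvFire_tok_ne _ "stuck_or_wrong_digital_sequence" _ rfl,
      pvFire_tok_ne _ "low_code_coverage_or_stuck_code_path" _ rfl,
      pvFire_def_ne _ _ rfl]
    simp [pvFire, List.sum_append, List.filterMap_append]
    split_ifs <;>
      simp [List.filterMap, List.append_assoc, *, Prod.ext_iff, Function.comp_def] <;> ring
  · have c1 : (p == "wrong_event_cadence_or_edge_count") = false := by simp [h1]
    have c2 : (p == "missing_or_wrong_pulse_window") = false := by simp [h2]
    have c3 : (p == "stuck_or_wrong_digital_sequence") = false := by simp [h3]
    have c4 : (p == "low_code_coverage_or_stuck_code_path") = false := by simp [h4]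
    have c5 : (p == "wrong_analog_range_or_threshold_window") = false := by simp [h5]
    have cd : pvKnown.contains p = false := by
      simp [pvKnown, pvPatternSpecs, h1, h2, h3, h4, h5]
    simp only [pvRules, pvPatternSpecs, List.flatMap_cons, List.flatMap_nil, List.append_nil,
      pvSegRules, pvAPattern, pvScanA_eq, pvFire_append, List.append_assoc, c1, c2, c3, c4, c5]
    rw [pvFire_tok_ne _ "wrong_event_cadence_or_edge_count" _ c1,
      pvFire_tok_ne _ "missing_or_wrong_pulse_window" _ c2,
      pvFire_tok_ne _ "stuck_or_wrong_digital_sequence" _ c3,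
      pvFire_tok_ne _ "low_code_coverage_or_stuck_code_path" _ c4,
      pvFire_tok_ne _ "wrong_analog_range_or_threshold_window" _ c5,
      pvFire_def_eq _ _ cd]
    simp [pvFire, List.sum_append, List.filterMap_append]
    split_ifs <;>
      simp [List.filterMap, List.append_assoc, *, Prod.ext_iff, Function.comp_def] <;> ring

-- ===== VERDICT (by name: the statement is the Claim_ definition above) =====
theorem score_region_py_spec : Claim_equal_score_region_py := by
  intro pattern kind text filename _
  unfold Spec_score_region_py
  have hA : score_region_py pattern kind text filename
      = ((pvACore pattern kind (PySem.Str.lower text) (PySem.Str.lower filename)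
            ((PySem.Str.count text "\n" : Int) + 1)).1,
         PySem.Str.join ", " ((pvACore pattern kind (PySem.Str.lower text) (PySem.Str.lower filename)
            ((PySem.Str.count text "\n" : Int) + 1)).2.take 8)) := rfl
  have hB : score_region_py_alt pattern kind text filename
      = ((pvBCore (pattern, kind, PySem.Str.lower text, PySem.Str.lower filename,
            (PySem.Str.count text "\n" : Int) + 1)).1,
         PySem.Str.join ", " ((pvBCore (pattern, kind, PySem.Str.lower text, PySem.Str.lower filename,
            (PySem.Str.count text "\n" : Int) + 1)).2.take 8)) := rfl
  rw [hA, hB, pvCore_eq]
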